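-- pv_equiv track=rewrite | github.com/amirsol81/html-Element-Inspector | globalPlugins/__init__.py | sort_params
-- ===== SOURCE A (Python) =====
-- JAWS_ORDER = [
--     "class","display","href","id",
--     "role","xml-roles",
--     "level","posinset","setsize",
--     "expanded","fsFormField",
--     "type","text-input-type",
--     "multiline","maxlength",
--     "autocomplete","haspopup",
--     "name-from","explicit-name",
--     "title","src","placeholder",
--     "text-align","text-model"
-- ]
--
-- def sort_params(params):
--     ordered=[]
--     for k in JAWS_ORDER:
--         if k in params:
--             ordered.append((k,params[k]))
--     for k in params:
--         if k not in [x[0] for x in ordered]: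
--             ordered.append((k,params[k]))
--     return ordered
-- ===== SOURCE B (Python) =====
-- JAWS_ORDER = [
--     "class","display","href","id",
--     "role","xml-roles",
--     "level","posinset","setsize",
--     "expanded","fsFormField",
--     "type","text-input-type",
--     "multiline","maxlength",
--     "autocomplete","haspopup",
--     "name-from","explicit-name",
--     "title","src","placeholder",
--     "text-align","text-model"
-- ]
--
-- def sort_params(params):
--     index = {k: i for i, k in enumerate(JAWS_ORDER)}
--     sentinel = len(JAWS_ORDER)
--     return sorted(params.items(), key=lambda kv: index.get(kv[0], sentinel))
-- ===== Notes on version B (the rewrite author's own statement) =====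
-- stated objective: faster
-- what changed: Replaces A's two filtering passes (a scan of JAWS_ORDER with dict-membership tests, then a scan of params whose inner comprehension rebuilds the already-collected key list for every element) by building a rank table from JAWS_ORDER once and returning a single stable sort of params.items() keyed by rank, with sentinel len(JAWS_ORDER) for unknown keys.
import Mathlib
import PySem

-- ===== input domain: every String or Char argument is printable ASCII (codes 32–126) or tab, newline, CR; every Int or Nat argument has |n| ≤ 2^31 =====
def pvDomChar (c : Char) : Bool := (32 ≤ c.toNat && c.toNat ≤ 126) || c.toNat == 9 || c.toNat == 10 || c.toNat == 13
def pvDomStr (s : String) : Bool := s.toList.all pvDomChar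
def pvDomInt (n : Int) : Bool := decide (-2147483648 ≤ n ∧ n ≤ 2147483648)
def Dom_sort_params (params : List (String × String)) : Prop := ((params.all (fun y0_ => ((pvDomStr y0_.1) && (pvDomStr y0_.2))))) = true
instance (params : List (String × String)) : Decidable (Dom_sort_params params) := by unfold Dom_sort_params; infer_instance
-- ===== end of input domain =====

-- B replaces A's two filtering passes by a rank table built once from JAWS_ORDER plus one
-- stable sort of the items keyed by rank (sentinel len(JAWS_ORDER) for unknown keys); idiomatic.

-- ===== PORT A =====
def JAWS_ORDER : List String := [
  "class","display","href","id",
  "role","xml-roles",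
  "level","posinset","setsize",
  "expanded","fsFormField",
  "type","text-input-type",
  "multiline","maxlength",
  "autocomplete","haspopup",
  "name-from","explicit-name",
  "title","src","placeholder",
  "text-align","text-model"]

def sort_params (params : List (String × String)) : List (String × String) :=
  -- params is a Python dict: 'k in params' = key membership, 'params[k]' = lookup,
  -- 'for k in params' iterates the keys in insertion order
  let d := PySem.Dict.mk params
  let ordered := JAWS_ORDER.foldl (fun acc k =>
    if d.contains k then
      acc ++ (match d.get? k with | some v => [(k, v)] | none => [])
    else acc) []
  params.foldl (fun acc p =>
    if (acc.map (fun x => x.1)).contains p.1 then acc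
    else acc ++ (match d.get? p.1 with | some v => [(p.1, v)] | none => [])) ordered

-- ===== PORT B =====
def jawsIndex : PySem.Dict String Int :=
  (PySem.List.enumerate JAWS_ORDER 0).foldl (fun d ik => d.insert ik.2 ik.1) PySem.Dict.empty

def sort_params_alt (params : List (String × String)) : List (String × String) :=
  PySem.List.sorted params (fun kv => jawsIndex.getD kv.1 ((JAWS_ORDER.length : Int))) false

-- ===== PRECONDITION & SPEC =====
-- Pre_ excludes association lists with duplicate keys: they do not encode a Python dict
-- (A's argument is a dict, whose keys are unique), so A's behaviour there is not defined
-- by the Python source at all.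
def Pre_sort_params (params : List (String × String)) : Prop :=
  (params.map Prod.fst).Nodup

instance (params : List (String × String)) : Decidable (Pre_sort_params params) := by
  unfold Pre_sort_params; infer_instance

def pvWitness_sort_params : (List (String × String)) :=
  [("id", "x"), ("zzz", "1"), ("class", "c")]

def Spec_sort_params (params : List (String × String)) (out : List (String × String)) : Prop := out = sort_params_alt params
instance (params : List (String × String)) (out : List (String × String)) : Decidable (Spec_sort_params params out) := by unfold Spec_sort_params; infer_instance

-- ===== CLAIM (what is proved, stated in full; the proofs are below) =====
def Claim_equal_sort_params : Prop := ∀ (params : List (String × String)), Dom_sort_params params → Pre_sort_params params → Spec_sort_params params (sort_params params)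

-- ===== LEMMAS AND PROOFS =====

-- the sort key of B, as a named function
def jawsRank (s : String) : Int := jawsIndex.getD s 24

-- bucket decomposition: the elements of xs of rank i, for each i of is, in order
def buckets (is : List Int) (xs : List (String × String)) : List (String × String) :=
  is.flatMap (fun i => xs.filter (fun p => jawsRank p.1 == i))

-- insertBy walks past a prefix none of whose elements x goes before
theorem insertBy_append_not_before {α : Type} (b : α → α → Bool) (x : α) :
    ∀ (A B : List α), (∀ a ∈ A, b x a = false) →
      PySem.List.insertBy b x (A ++ B) = A ++ PySem.List.insertBy b x B := by
  intro A
  induction A with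
  | nil => simp
  | cons a A ih =>
    intro B h
    simp only [List.cons_append, PySem.List.insertBy, h a (by simp)]
    simp [ih B (fun a ha => h a (by simp [ha]))]

-- insertBy puts x in front when it goes before every element
theorem insertBy_front {α : Type} (b : α → α → Bool) (x : α) (B : List α)
    (h : ∀ y ∈ B, b x y = true) : PySem.List.insertBy b x B = x :: B := by
  cases B with
  | nil => rfl
  | cons y ys => simp [PySem.List.insertBy, h y (by simp)]

-- membership in a bucket concatenation forces the rank into the index list
theorem mem_buckets_rank {is : List Int} {xs : List (String × String)} {y : String × String}
    (h : y ∈ buckets is xs) : jawsRank y.1 ∈ is := by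
  simp only [buckets, List.mem_flatMap, List.mem_filter] at h
  obtain ⟨i, hi, _, hr⟩ := h
  rw [beq_iff_eq] at hr
  exact hr ▸ hi

-- appending an element whose rank is outside the index list leaves the buckets unchanged
theorem buckets_append_notmem {is : List Int} {xs : List (String × String)}
    {x0 : String × String} (h : jawsRank x0.1 ∉ is) :
    buckets is (xs ++ [x0]) = buckets is xs := by
  unfold buckets
  refine List.flatMap_congr (fun i hi => ?_)
  rw [List.filter_append]
  have hne : jawsRank x0.1 ≠ i := fun he => h (he ▸ hi)
  have : ([x0].filter (fun p => jawsRank p.1 == i)) = [] := by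
    simp [hne]
  simp [this]

-- inserting x0 into a bucket concatenation appends it to its own bucket
theorem insertBy_buckets (is : List Int) (hs : is.Pairwise (· < ·)) :
    ∀ (xs : List (String × String)) (x0 : String × String),
      jawsRank x0.1 ∈ is →
      PySem.List.insertBy (fun a b => decide (jawsRank a.1 < jawsRank b.1)) x0 (buckets is xs)
        = buckets is (xs ++ [x0]) := by
  induction is with
  | nil => intro xs x0 h0; simp at h0
  | cons i is ih =>
    intro xs x0 h0
    have hlt : ∀ j ∈ is, i < j := fun j hj => List.rel_of_pairwise_cons hs hj
    have hcons : buckets (i :: is) xs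
        = xs.filter (fun p => jawsRank p.1 == i) ++ buckets is xs := by
      simp [buckets]
    have hskip : ∀ a ∈ xs.filter (fun p => jawsRank p.1 == i),
        (decide (jawsRank x0.1 < jawsRank a.1)) = false := by
      intro a ha
      have hai : jawsRank a.1 = i := by
        have := (List.mem_filter.mp ha).2; rwa [beq_iff_eq] at this
      rcases List.mem_cons.mp h0 with h | h
      · simp [hai, h]
      · have := hlt _ h
        simp only [hai, decide_eq_false_iff_not, not_lt]
        omega
    rw [hcons, insertBy_append_not_before _ _ _ _ hskip]
    by_cases hx : jawsRank x0.1 = i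
    · have hfront : PySem.List.insertBy (fun a b => decide (jawsRank a.1 < jawsRank b.1)) x0
          (buckets is xs) = x0 :: buckets is xs := by
        refine insertBy_front _ _ _ (fun y hy => ?_)
        have := hlt _ (mem_buckets_rank hy)
        simp only [decide_eq_true_eq, hx]
        omega
      have hnotin : jawsRank x0.1 ∉ is := by
        intro hmem; have := hlt _ hmem; omega
      rw [hfront]
      have : buckets (i :: is) (xs ++ [x0])
          = (xs ++ [x0]).filter (fun p => jawsRank p.1 == i) ++ buckets is (xs ++ [x0]) := by
        simp [buckets]
      rw [this, buckets_append_notmem hnotin, List.filter_append]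
      simp [hx]
    · have hx0 : jawsRank x0.1 ∈ is := by
        rcases List.mem_cons.mp h0 with h | h
        · exact absurd h hx
        · exact h
      rw [ih (List.Pairwise.of_cons hs) xs x0 hx0]
      have hl : buckets (i :: is) (xs ++ [x0])
          = (xs ++ [x0]).filter (fun p => jawsRank p.1 == i) ++ buckets is (xs ++ [x0]) := by
        simp [buckets]
      rw [hl, List.filter_append]
      simp [hx]

-- the stable sort by rank is the bucket concatenation
theorem sorted_eq_buckets (is : List Int) (hs : is.Pairwise (· < ·)) (xs : List (String × String))
    (hm : ∀ x ∈ xs, jawsRank x.1 ∈ is) :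
    PySem.List.sorted xs (fun kv => jawsRank kv.1) false = buckets is xs := by
  rw [PySem.List.sorted_eq_foldl_insertBy]
  induction xs using List.reverseRecOn with
  | nil => simp [buckets]
  | append_singleton xs x0 ih =>
    rw [List.foldl_append, List.foldl_cons, List.foldl_nil,
      ih (fun x hx => hm x (by simp [hx])),
      insertBy_buckets is hs xs x0 (hm x0 (by simp))]

-- jawsIndex is the association of each JAWS_ORDER key with its position
theorem get?_enum_foldl (s : String) :
    ∀ (ks : List String) (n : Int) (d : PySem.Dict String Int), ks.Nodup →
      ((PySem.List.enumerate ks n).foldl (fun d ik => d.insert ik.2 ik.1) d).get? s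
        = (match PySem.List.index? ks s with
            | some j => some (n + j)
            | none => d.get? s) := by
  intro ks
  induction ks with
  | nil => intro n d _; simp [PySem.List.enumerate_nil, PySem.List.index?]
  | cons k ks ih =>
    intro n d hnd
    rw [PySem.List.enumerate_cons, List.foldl_cons]
    rw [ih (n + 1) (d.insert k n) hnd.of_cons]
    by_cases hk : k = s
    · subst hk
      have h1 : PySem.List.index? ks k = none :=
        (PySem.List.index?_eq_none_iff ks k).mpr (fun hmem => (List.nodup_cons.mp hnd).1 hmem)
      have h2 : PySem.List.index? (k :: ks) k = some 0 := PySem.List.index?_cons_self k ks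
      rw [h1, h2]
      simp [PySem.Dict.get?_insert_self]
    · have h2 : PySem.List.index? (k :: ks) s = (PySem.List.index? ks s).map (· + 1) :=
        PySem.List.index?_cons_of_ne ks hk
      rw [h2]
      cases h3 : PySem.List.index? ks s with
      | none => exact PySem.Dict.get?_insert_of_ne d n (fun h => hk h.symm)
      | some j =>
        simp only [Option.map_some]
        congr 1
        push_cast
        ring

theorem jawsIndex_get? (s : String) :
    jawsIndex.get? s = (PySem.List.index? JAWS_ORDER s).map (fun j => (j : Int)) := by
  have hnd : JAWS_ORDER.Nodup := by decide
  rw [jawsIndex, get?_enum_foldl s JAWS_ORDER 0 PySem.Dict.empty hnd]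
  cases h : PySem.List.index? JAWS_ORDER s with
  | none => rfl
  | some j => simp

theorem jawsRank_of_not_mem {s : String} (h : s ∉ JAWS_ORDER) : jawsRank s = 24 := by
  have : PySem.List.index? JAWS_ORDER s = none := (PySem.List.index?_eq_none_iff _ _).mpr h
  rw [jawsRank, PySem.Dict.getD_eq_get?_getD, jawsIndex_get?, this]
  rfl

theorem jawsRank_index? {s : String} {j : Nat} (h : PySem.List.index? JAWS_ORDER s = some j) :
    jawsRank s = j := by
  rw [jawsRank, PySem.Dict.getD_eq_get?_getD, jawsIndex_get?, h]
  rfl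

theorem jawsRank_lt_of_mem {s : String} (h : s ∈ JAWS_ORDER) : jawsRank s < 24 := by
  rcases Option.isSome_iff_exists.mp ((PySem.List.index?_isSome_iff _ _).mpr h) with ⟨j, hj⟩
  obtain ⟨hlt, -, -⟩ := PySem.List.getElem_of_index?_eq_some hj
  have h24 : JAWS_ORDER.length = 24 := by decide
  rw [jawsRank_index? hj]
  omega

theorem jawsRank_inj {k s : String} (hk : k ∈ JAWS_ORDER) (h : jawsRank s = jawsRank k) :
    s = k := by
  rcases Option.isSome_iff_exists.mp ((PySem.List.index?_isSome_iff _ _).mpr hk) with ⟨jk, hjk⟩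
  cases hs : PySem.List.index? JAWS_ORDER s with
  | none =>
    exfalso
    have h1 := jawsRank_of_not_mem ((PySem.List.index?_eq_none_iff _ _).mp hs)
    have h2 := jawsRank_lt_of_mem hk
    omega
  | some js =>
    have h1 := jawsRank_index? hjk
    have h2 := jawsRank_index? hs
    have hjj : js = jk := by omega
    obtain ⟨h3, h4, -⟩ := PySem.List.getElem_of_index?_eq_some hjk
    obtain ⟨h5, h6, -⟩ := PySem.List.getElem_of_index?_eq_some hs
    subst hjj
    rw [← h4, ← h6]

theorem jaws_map_rank : JAWS_ORDER.map jawsRank = PySem.List.pyRange 0 24 1 := by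
  decide

-- lookup in a duplicate-free association list finds the pair itself
theorem get?_mk_of_mem : ∀ (params : List (String × String)), (params.map Prod.fst).Nodup →
    ∀ p ∈ params, (PySem.Dict.mk params).get? p.1 = some p.2 := by
  intro params
  induction params with
  | nil => intro _ p hp; simp at hp
  | cons q rest ih =>
    intro hnd p hp
    have hnd' : (q.1 :: rest.map Prod.fst).Nodup := by simpa using hnd
    have h1 : q.1 ∉ rest.map Prod.fst := (List.nodup_cons.mp hnd').1
    have h2 : (rest.map Prod.fst).Nodup := (List.nodup_cons.mp hnd').2
    rw [PySem.Dict.get?_mk_cons]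
    rcases List.mem_cons.mp hp with h | h
    · subst h; simp
    · have hne : q.1 ≠ p.1 := by
        intro he
        exact h1 (he ▸ List.mem_map_of_mem h)
      simp only [beq_iff_eq, hne, if_false]
      exact ih h2 p h

-- the filter by one key of a duplicate-free association list is its lookup result
theorem filter_eq_lookup (k : String) : ∀ (params : List (String × String)),
    (params.map Prod.fst).Nodup →
    params.filter (fun p => p.1 == k)
      = (match (PySem.Dict.mk params).get? k with | some v => [(k, v)] | none => []) := by
  intro params
  induction params with
  | nil => intro _; rfl
  | cons q rest ih =>
    intro hnd
    have hnd' : (q.1 :: rest.map Prod.fst).Nodup := by simpa using hnd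
    have h1 : q.1 ∉ rest.map Prod.fst := (List.nodup_cons.mp hnd').1
    have h2 : (rest.map Prod.fst).Nodup := (List.nodup_cons.mp hnd').2
    rw [List.filter_cons, PySem.Dict.get?_mk_cons]
    by_cases hq : q.1 = k
    · have hnotin : ∀ p ∈ rest, ¬(p.1 == k) = true := by
        intro p hp hpk
        rw [beq_iff_eq] at hpk
        exact h1 (hq ▸ hpk ▸ List.mem_map_of_mem hp)
      have hfil : rest.filter (fun p => p.1 == k) = [] :=
        List.filter_eq_nil_iff.mpr hnotin
      simp [hq, hfil]
      exact Prod.ext (by rw [hq]) rfl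
    · simp only [beq_iff_eq, hq, if_false]
      exact ih h2

-- A's first loop, written as a flatMap, equals the bucket concatenation over the known ranks
theorem flatMap_buckets (params : List (String × String)) (hnd : (params.map Prod.fst).Nodup) :
    ∀ (ks : List String), (∀ k ∈ ks, ∀ s, jawsRank s = jawsRank k → s = k) →
    ks.flatMap (fun k => if (PySem.Dict.mk params).contains k then
        (match (PySem.Dict.mk params).get? k with | some v => [(k, v)] | none => []) else [])
      = buckets (ks.map jawsRank) params := by
  intro ks
  induction ks with
  | nil => intro _; rfl
  | cons k ks ih =>
    intro hinj
    rw [List.flatMap_cons, List.map_cons]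
    have hrhs : buckets (jawsRank k :: ks.map jawsRank) params
        = params.filter (fun p => jawsRank p.1 == jawsRank k)
          ++ buckets (ks.map jawsRank) params := by
      simp [buckets]
    rw [hrhs, ← ih (fun k' hk' s hs => hinj k' (by simp [hk']) s hs)]
    congr 1
    have hfe : params.filter (fun p => jawsRank p.1 == jawsRank k)
        = params.filter (fun p => p.1 == k) := by
      apply List.filter_congr
      intro p _
      by_cases h : p.1 = k
      · simp [h]
      · have : jawsRank p.1 ≠ jawsRank k := fun he => h (hinj k (by simp) p.1 he)
        simp [h, this]
    rw [hfe, filter_eq_lookup k params hnd]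
    rw [PySem.Dict.contains_eq_isSome_get?]
    cases hg : (PySem.Dict.mk params).get? k with
    | none => simp
    | some v => simp

-- A's second loop appends exactly the pairs whose key is not among ordered's keys
theorem second_loop (params : List (String × String))
    (ordered : List (String × String)) :
    ∀ (rest extra : List (String × String)),
      (∀ p ∈ rest, (PySem.Dict.mk params).get? p.1 = some p.2) →
      (rest.map Prod.fst).Nodup →
      (∀ p ∈ rest, p.1 ∉ extra.map Prod.fst) →
      rest.foldl (fun acc p =>
        if (acc.map (fun x => x.1)).contains p.1 then acc
        else acc ++ (match (PySem.Dict.mk params).get? p.1 with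
                     | some v => [(p.1, v)] | none => [])) (ordered ++ extra)
        = ordered ++ extra ++ rest.filter (fun p => !((ordered.map Prod.fst).contains p.1)) := by
  intro rest
  induction rest with
  | nil => intro extra _ _ _; simp
  | cons p rest ih =>
    intro extra hlook hnodup hdisj
    have hpe : p.1 ∉ extra.map Prod.fst := hdisj p (by simp)
    have hnd' : (p.1 :: rest.map Prod.fst).Nodup := by simpa using hnodup
    have hpr : p.1 ∉ rest.map Prod.fst := (List.nodup_cons.mp hnd').1
    rw [List.foldl_cons]
    have hmapapp : ((ordered ++ extra).map (fun x => x.1)).contains p.1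
        = (ordered.map Prod.fst).contains p.1 := by
      simp only [List.map_append, List.contains_append]
      have : (extra.map (fun x => x.1)).contains p.1 = false := by
        simpa using hpe
      rw [this, Bool.or_false]
    rw [List.filter_cons, hmapapp]
    by_cases hc : (ordered.map Prod.fst).contains p.1
    · rw [if_pos hc]
      simp only [hc, Bool.not_true]
      exact ih extra (fun q hq => hlook q (by simp [hq])) (by simpa using (List.nodup_cons.mp hnd').2) (fun q hq => hdisj q (by simp [hq]))
    · rw [if_neg hc]
      have hmatch : (match (PySem.Dict.mk params).get? p.1 with
          | some v => [(p.1, v)] | none => ([] : List (String × String))) = [p] := by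
        rw [hlook p (by simp)]
      rw [hmatch]
      have := ih (extra ++ [p]) (fun q hq => hlook q (by simp [hq]))
        (by simpa using (List.nodup_cons.mp hnd').2)
        (fun q hq => by
          simp only [List.map_append, List.mem_append]
          push Not
          refine ⟨hdisj q (by simp [hq]), ?_⟩
          simp only [List.map_cons, List.map_nil, List.mem_singleton]
          intro he
          exact hpr (he ▸ List.mem_map_of_mem hq))
      rw [List.append_assoc ordered extra, this]
      simp only [List.append_assoc]
      simp
      intro x hx
      apply hc
      exact List.contains_iff_mem.mpr (by simpa using List.mem_map_of_mem (f := Prod.fst) hx)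

-- every rank lies in [0, 24]
theorem jawsRank_mem_range (s : String) : jawsRank s ∈ PySem.List.pyRange 0 25 1 := by
  rw [PySem.List.mem_pyRange_one]
  cases hs : PySem.List.index? JAWS_ORDER s with
  | none => rw [jawsRank_of_not_mem ((PySem.List.index?_eq_none_iff _ _).mp hs)]; omega
  | some j =>
    obtain ⟨hlt, -, -⟩ := PySem.List.getElem_of_index?_eq_some hs
    have h24 : JAWS_ORDER.length = 24 := by decide
    rw [h24] at hlt
    rw [jawsRank_index? hs]
    omega

-- the keys produced by A's first loop are exactly the JAWS_ORDER keys present in params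
theorem mem_first_loop_keys (params : List (String × String)) (x : String) :
    x ∈ (JAWS_ORDER.flatMap (fun k => if (PySem.Dict.mk params).contains k then
        (match (PySem.Dict.mk params).get? k with | some v => [(k, v)] | none => []) else [])).map Prod.fst
      ↔ x ∈ JAWS_ORDER ∧ ((PySem.Dict.mk params).get? x).isSome := by
  constructor
  · rintro hx
    rcases List.mem_map.mp hx with ⟨q, hq, hqx⟩
    rcases List.mem_flatMap.mp hq with ⟨k, hk, hqk⟩
    by_cases hc : (PySem.Dict.mk params).contains k
    · rw [if_pos hc] at hqk
      cases hg : (PySem.Dict.mk params).get? k with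
      | none => rw [hg] at hqk; simp at hqk
      | some v =>
        rw [hg] at hqk
        simp only [List.mem_singleton] at hqk
        subst hqk
        simp only at hqx
        subst hqx
        exact ⟨hk, by simp [hg]⟩
    · rw [if_neg hc] at hqk; simp at hqk
  · rintro ⟨hmem, hsome⟩
    rcases Option.isSome_iff_exists.mp hsome with ⟨v, hv⟩
    refine List.mem_map.mpr ⟨(x, v), List.mem_flatMap.mpr ⟨x, hmem, ?_⟩, rfl⟩
    rw [if_pos (by rw [PySem.Dict.contains_eq_isSome_get?, hv]; rfl), hv]
    simp

-- ===== VERDICT (by name: the statement is the Claim_ definition above) =====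
theorem sort_params_spec : Claim_equal_sort_params := by
  intro params _ hpre
  have hnd : (params.map Prod.fst).Nodup := hpre
  unfold Spec_sort_params sort_params sort_params_alt
  simp only []
  -- name A's first loop
  set f : String → List (String × String) := fun k =>
    if (PySem.Dict.mk params).contains k then
      (match (PySem.Dict.mk params).get? k with | some v => [(k, v)] | none => []) else []
    with hf
  have hstep : (fun (acc : List (String × String)) k =>
      if (PySem.Dict.mk params).contains k then
        acc ++ (match (PySem.Dict.mk params).get? k with | some v => [(k, v)] | none => [])
      else acc) = (fun acc k => acc ++ f k) := by
    funext acc k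
    rw [hf]
    beta_reduce
    by_cases hc : (PySem.Dict.mk params).contains k = true
    · rw [if_pos hc, if_pos hc]
    · rw [if_neg hc, if_neg hc, List.append_nil]
  rw [hstep, PySem.List.foldl_append_eq_flatMap, List.nil_append]
  -- A's second loop
  have h2 := second_loop params (JAWS_ORDER.flatMap f) params []
    (get?_mk_of_mem params hnd) hnd (by simp)
  rw [List.append_nil] at h2
  rw [h2]
  -- the leftover filter is the rank-24 bucket
  have hfil : params.filter (fun p => !(((JAWS_ORDER.flatMap f).map Prod.fst).contains p.1))
      = params.filter (fun p => jawsRank p.1 == 24) := by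
    apply List.filter_congr
    intro p hp
    by_cases hm : p.1 ∈ JAWS_ORDER
    · have hrank : jawsRank p.1 < 24 := jawsRank_lt_of_mem hm
      have hkey : p.1 ∈ (JAWS_ORDER.flatMap f).map Prod.fst :=
        (mem_first_loop_keys params p.1).mpr
          ⟨hm, by rw [get?_mk_of_mem params hnd p hp]; rfl⟩
      have hc : ((JAWS_ORDER.flatMap f).map Prod.fst).contains p.1 = true := by
        exact List.contains_iff_mem.mpr hkey
      rw [hc]
      have : (jawsRank p.1 == 24) = false := by
        simp only [beq_eq_false_iff_ne, ne_eq]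
        omega
      rw [this]
      rfl
    · have hrank : jawsRank p.1 = 24 := jawsRank_of_not_mem hm
      have hkey : p.1 ∉ (JAWS_ORDER.flatMap f).map Prod.fst := fun hx =>
        hm ((mem_first_loop_keys params p.1).mp hx).1
      have hc : ((JAWS_ORDER.flatMap f).map Prod.fst).contains p.1 = false := by
        rw [← Bool.not_eq_true]
        exact fun h => hkey (List.contains_iff_mem.mp h)
      rw [hc]
      simp [hrank]
  rw [hfil]
  -- A's first loop is the bucket concatenation over the known ranks
  have hfirst : JAWS_ORDER.flatMap f
      = buckets (PySem.List.pyRange 0 24 1) params := by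
    rw [hf, flatMap_buckets params hnd JAWS_ORDER
      (fun k hk s hs => jawsRank_inj hk hs), jaws_map_rank]
  rw [hfirst]
  -- B is the bucket concatenation over all ranks
  have hkeyfun : (fun kv : String × String => jawsIndex.getD kv.1 ((JAWS_ORDER.length : Int)))
      = (fun kv : String × String => jawsRank kv.1) := by
    funext kv
    have : ((JAWS_ORDER.length : Int)) = 24 := by norm_num [JAWS_ORDER]
    rw [this, jawsRank]
  rw [hkeyfun, sorted_eq_buckets (PySem.List.pyRange 0 25 1)
    (PySem.List.pairwise_lt_pyRange_one 0 25) params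
    (fun x _ => jawsRank_mem_range x.1)]
  -- split the full bucket list at rank 24
  have hsplit : PySem.List.pyRange 0 25 1 = PySem.List.pyRange 0 24 1 ++ [24] := by
    decide
  rw [hsplit]
  unfold buckets
  rw [List.flatMap_append]
  simp
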